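-- pv_equiv track=rewrite | github.com/Mcusac/kaggle-ml-comp-scripts | scripts/layers/layer_1_competition/level_1_impl/level_arc_agi_2/level_0/llm_tta/llm_tta_grid_utils.py | coerce_arc_grid
-- ===== SOURCE A (Python) =====
-- from typing import Any, Mapping
--
-- Grid = list[list[int]]
--
-- def coerce_arc_grid(grid: Any, fallback: Grid) -> Grid:
--     """Return a clean rectangular ``list[list[int]]`` with values mod 10, or ``fallback`` on failure."""
--     if not isinstance(grid, list):
--         return fallback
--     if not grid:
--         return []
--     if not all(isinstance(row, list) for row in grid):
--         return fallback
--     width = len(grid[0])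
--     if any(len(row) != width for row in grid):
--         return fallback
--     try:
--         return [[int(v) % 10 for v in row] for row in grid]
--     except Exception:
--         return fallback
-- ===== SOURCE B (Python) =====
-- def coerce_arc_grid(grid, fallback):
--     """Set-of-widths rectangularity test, then flatten all values to one
--     flat mod-10 list and reshape it back into rows by slicing."""
--     if not isinstance(grid, list):
--         return fallback
--     if not grid:
--         return []
--     if not all(isinstance(row, list) for row in grid):
--         return fallback
--     if len({len(row) for row in grid}) != 1:
--         return fallback
--     try:
--         flat = [int(v) % 10 for row in grid for v in row]
--     except Exception:
--         return fallback
--     w = len(grid[0])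
--     return [flat[i * w:(i + 1) * w] for i in range(len(grid))]
-- ===== Notes on version B (the rewrite author's own statement) =====
-- stated objective: alternative
-- what changed: A checks every row's length against the first row's width and maps each row with a nested comprehension; B decides rectangularity by collapsing the row lengths into a set and testing it is a singleton, then flattens all values into one flat mod-10 list and reconstructs the rows by slicing that flat list at multiples of the width.
import Mathlib
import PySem

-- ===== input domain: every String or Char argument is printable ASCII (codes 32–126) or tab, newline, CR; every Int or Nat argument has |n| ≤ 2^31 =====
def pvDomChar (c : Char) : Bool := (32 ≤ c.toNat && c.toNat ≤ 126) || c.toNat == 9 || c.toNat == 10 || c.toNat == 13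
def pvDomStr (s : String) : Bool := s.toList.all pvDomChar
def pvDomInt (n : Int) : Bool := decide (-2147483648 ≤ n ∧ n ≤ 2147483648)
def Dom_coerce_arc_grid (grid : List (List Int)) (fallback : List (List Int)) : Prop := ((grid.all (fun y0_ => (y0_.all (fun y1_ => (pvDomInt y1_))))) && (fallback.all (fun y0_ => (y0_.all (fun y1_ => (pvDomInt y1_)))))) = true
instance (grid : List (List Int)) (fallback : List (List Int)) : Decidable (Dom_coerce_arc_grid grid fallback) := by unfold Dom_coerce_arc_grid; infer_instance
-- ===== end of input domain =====

-- B replaces A's compare-each-row-to-the-first-width check by a set-of-widths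
-- singleton test, and A's nested row-by-row mapping by flatten-then-reshape-by-slicing
-- (objective: alternative; same cost).

-- ===== PORT A =====
-- Under the type convention grid : List (List Int), so 'not isinstance(grid, list)'
-- and 'not all(isinstance(row, list) ...)' are always False, and int(v) % 10 never
-- raises (the try body always returns normally); % 10 is PySem.Int.mod.
def coerce_arc_grid (grid : List (List Int)) (fallback : List (List Int)) : List (List Int) :=
  if grid.isEmpty then []
  else
    let width := (grid.headD []).length
    if grid.any (fun row => row.length != width) then fallback
    else grid.map (fun row => row.map (fun v => PySem.Int.mod v 10))

-- ===== PORT B =====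
-- Source B: set of row widths must be a singleton; then one flat comprehension over all
-- values (flatMap) and reshape by slices flat[i*w:(i+1)*w] for i in range(len(grid)).
def coerce_arc_grid_alt (grid : List (List Int)) (fallback : List (List Int)) : List (List Int) :=
  if grid.isEmpty then []
  else if (PySem.Set.ofList (grid.map (fun row => row.length))).length ≠ 1 then fallback
  else
    let flat := grid.flatMap (fun row => row.map (fun v => PySem.Int.mod v 10))
    let w : Int := (grid.headD []).length
    (PySem.List.pyRange 0 grid.length 1).map
      (fun i => PySem.List.slice flat (some (i * w)) (some ((i + 1) * w)))

-- ===== PRECONDITION & SPEC =====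
def Spec_coerce_arc_grid (grid : List (List Int)) (fallback : List (List Int)) (out : List (List Int)) : Prop := out = coerce_arc_grid_alt grid fallback
instance (grid : List (List Int)) (fallback : List (List Int)) (out : List (List Int)) : Decidable (Spec_coerce_arc_grid grid fallback out) := by unfold Spec_coerce_arc_grid; infer_instance

-- ===== CLAIM =====
def Claim_equal_coerce_arc_grid : Prop := ∀ (grid : List (List Int)) (fallback : List (List Int)), Dom_coerce_arc_grid grid fallback → Spec_coerce_arc_grid grid fallback (coerce_arc_grid grid fallback)

-- ===== LEMMAS AND PROOFS =====

-- the set of widths of (r :: rest) is a singleton iff every width equals r's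
theorem widths_set_singleton (r : List Int) (rest : List (List Int)) :
    (PySem.Set.ofList ((r :: rest).map (fun row => row.length))).length = 1 ↔
      ∀ row ∈ rest, row.length = r.length := by
  rw [List.map_cons, PySem.Set.ofList_cons]
  constructor
  · intro h row hrow
    by_contra hne
    have hmem : row.length ∈ PySem.Set.discard (PySem.Set.ofList (rest.map (fun row => row.length))) r.length := by
      rw [PySem.Set.mem_discard]
      exact ⟨(PySem.Set.mem_ofList _ _).mpr (List.mem_map.mpr ⟨row, hrow, rfl⟩), hne⟩
    simp only [List.length_cons] at h
    have hz : (PySem.Set.discard (PySem.Set.ofList (rest.map (fun row => row.length))) r.length).length = 0 := by omega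
    rw [List.length_eq_zero_iff.mp hz] at hmem
    simp at hmem
  · intro h
    have hd : PySem.Set.discard (PySem.Set.ofList (rest.map (fun row => row.length))) r.length = [] := by
      apply List.eq_nil_iff_forall_not_mem.mpr
      intro y hy
      rw [PySem.Set.mem_discard, PySem.Set.mem_ofList] at hy
      rcases hy with ⟨hy1, hy2⟩
      rcases List.mem_map.mp hy1 with ⟨row, hrow, rfl⟩
      exact hy2 (h row hrow)
    simp [hd]

-- reshaping the flattened mapped grid by w-slices recovers the mapped rows
theorem reshape_flat (f : Int → Int) (w : Nat) :
    ∀ (grid : List (List Int)) (k : Nat) (hk : k < grid.length), (∀ row ∈ grid, row.length = w) →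
      (((grid.flatMap (fun row => row.map f)).drop (k * w)).take w) = (grid[k]'hk).map f := by
  intro grid
  induction grid with
  | nil => intro k hk _; simp at hk
  | cons r rest ih =>
    intro k hk hall
    have hr : (r.map f).length = w := by
      rw [List.length_map]; exact hall r (by simp)
    cases k with
    | zero =>
      simp only [List.flatMap_cons, Nat.zero_mul, List.drop_zero, List.getElem_cons_zero]
      rw [← hr, List.take_left]
    | succ k =>
      simp only [List.flatMap_cons, List.getElem_cons_succ]
      have hsplit : (k + 1) * w = w + k * w := by ring
      rw [hsplit, ← List.drop_drop]
      rw [show (r.map f ++ rest.flatMap (fun row => row.map f)).drop w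
            = rest.flatMap (fun row => row.map f) by rw [← hr, List.drop_left]]
      exact ih k (by simpa using hk) (fun row hrow => hall row (List.mem_cons_of_mem r hrow))

theorem coerce_eq (grid fallback : List (List Int)) :
    coerce_arc_grid grid fallback = coerce_arc_grid_alt grid fallback := by
  cases grid with
  | nil => rfl
  | cons r rest =>
    simp only [coerce_arc_grid, coerce_arc_grid_alt, List.isEmpty_cons, List.headD_cons,
      Bool.false_eq_true, if_false]
    by_cases hrect : ∀ row ∈ rest, row.length = r.length
    · have hany : (r :: rest).any (fun row => row.length != r.length) = false := by
        simp only [List.any_eq_false]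
        intro row hrow
        rcases List.mem_cons.mp hrow with h | h
        · simp [h]
        · simp [hrect row h]
      have hset : ¬ (PySem.Set.ofList ((r :: rest).map (fun row => row.length))).length ≠ 1 := by
        simp only [ne_eq, not_not]
        exact (widths_set_singleton r rest).mpr hrect
      simp only [hany, Bool.false_eq_true, if_false, if_neg hset]
      apply List.ext_getElem
      · simp [PySem.List.length_pyRange_one]
      · intro k hk1 hk2
        simp only [List.getElem_map, PySem.List.getElem_pyRange_one, zero_add]
        have hk : k < (r :: rest).length := by
          simpa [PySem.List.length_pyRange_one] using hk2
        rw [show ((k : Int) * (r.length : Nat)) = ((k * r.length : Nat) : Int) by push_cast; ring,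
            show (((k : Int) + 1) * (r.length : Nat)) = ((k * r.length : Nat) : Int) + (r.length : Int) by push_cast; ring]
        rw [PySem.List.slice_natCast_add]
        exact Eq.symm <| reshape_flat (fun v => PySem.Int.mod v 10) r.length (r :: rest) k hk
          (fun row hrow => by
            rcases List.mem_cons.mp hrow with h | h
            · simp [h]
            · exact hrect row h)
    · have hany : (r :: rest).any (fun row => row.length != r.length) = true := by
        rw [List.any_eq_true]
        push Not at hrect
        rcases hrect with ⟨row, hrow, hne⟩
        exact ⟨row, List.mem_cons_of_mem r hrow, by simp [hne]⟩
      have hset : (PySem.Set.ofList ((r :: rest).map (fun row => row.length))).length ≠ 1 := by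
        intro h
        exact hrect ((widths_set_singleton r rest).mp h)
      simp only [hany, if_true, if_pos hset]

-- ===== VERDICT =====
theorem coerce_arc_grid_spec : Claim_equal_coerce_arc_grid := by
  intro grid fallback _
  exact coerce_eq grid fallback
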